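-- pv_equiv track=rewrite | github.com/Hst28/CODSOFT_RecommendationSystem | CODSOFT_RecommendationSystem.py | content_based_recommendation
-- ===== SOURCE A (Python) =====
-- def content_based_recommendation(user_preferences):
--
--     movies_data = {
--         'Movie1': ['Action', 'Adventure'],
--         'Movie2': ['Comedy', 'Romance'],
--         'Movie3': ['Action', 'Drama'],
--         'Movie4': ['Comedy', 'Adventure'],
--         'Movie5': ['Drama', 'Romance'],
--     }
--
--     recommendations = []
--     for movie, genres in movies_data.items():
--         common_genres = set(user_preferences) & set(genres)
--         if common_genres:
--             recommendations.append(movie)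
--
--     return recommendations
-- ===== SOURCE B (Python) =====
-- def content_based_recommendation(user_preferences):
--     movies_data = {
--         'Movie1': ['Action', 'Adventure'],
--         'Movie2': ['Comedy', 'Romance'],
--         'Movie3': ['Action', 'Drama'],
--         'Movie4': ['Comedy', 'Adventure'],
--         'Movie5': ['Drama', 'Romance'],
--     }
--     # inverted index: genre -> movies having it, in movies_data order
--     index = {}
--     for movie, genres in movies_data.items():
--         for g in genres:
--             index.setdefault(g, []).append(movie)
--     recommended = set()
--     for g in user_preferences:
--         recommended.update(index.get(g, []))
--     return [m for m in movies_data if m in recommended]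
-- ===== Notes on version B (the rewrite author's own statement) =====
-- stated objective: alternative
-- what changed: B replaces A's per-movie set-intersection test with an inverted genre-to-movies index, a result set accumulated from the user's preferences, and a final ordered pass over the movie keys.
import Mathlib
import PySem

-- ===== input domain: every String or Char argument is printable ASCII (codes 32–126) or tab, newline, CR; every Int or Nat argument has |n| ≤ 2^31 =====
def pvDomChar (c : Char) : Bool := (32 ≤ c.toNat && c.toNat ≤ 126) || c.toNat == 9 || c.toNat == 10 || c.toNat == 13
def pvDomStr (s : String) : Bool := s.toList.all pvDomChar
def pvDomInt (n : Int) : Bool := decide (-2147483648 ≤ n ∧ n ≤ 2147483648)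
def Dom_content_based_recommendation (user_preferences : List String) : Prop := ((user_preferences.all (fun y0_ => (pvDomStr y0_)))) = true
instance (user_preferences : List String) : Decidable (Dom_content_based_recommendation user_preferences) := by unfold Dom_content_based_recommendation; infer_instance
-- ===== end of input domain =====

-- B replaces A's per-movie set intersections by an inverted genre→movies index plus one
-- result set, then a final pass over the movie keys (objective: alternative decomposition).

-- the literal movies_data dict both Pythons embed, as an insertion-ordered assoc list
def pvMoviesData : List (String × List String) :=
  [("Movie1", ["Action", "Adventure"]),
   ("Movie2", ["Comedy", "Romance"]),
   ("Movie3", ["Action", "Drama"]),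
   ("Movie4", ["Comedy", "Adventure"]),
   ("Movie5", ["Drama", "Romance"])]

-- ===== PORT A =====
def content_based_recommendation (user_preferences : List String) : List String :=
  pvMoviesData.foldl (fun recommendations mg =>
    let common_genres :=
      PySem.Set.inter (PySem.Set.ofList user_preferences) (PySem.Set.ofList mg.2)
    if common_genres ≠ [] then recommendations ++ [mg.1] else recommendations) []

-- ===== PORT B =====
-- inverted index: genre -> movies having it, in movies_data order (index.setdefault(g, []).append(movie))
def pvIndex : PySem.Dict String (List String) :=
  pvMoviesData.foldl (fun d mg =>
    mg.2.foldl (fun d g => d.insert g (d.getD g [] ++ [mg.1])) d) PySem.Dict.empty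

def content_based_recommendation_alt (user_preferences : List String) : List String :=
  let recommended : PySem.Set String :=
    user_preferences.foldl (fun s g => PySem.Set.update s (pvIndex.getD g [])) PySem.Set.empty
  (pvMoviesData.map (·.1)).filter (fun m => PySem.Set.contains recommended m)

-- ===== PRECONDITION & SPEC =====
def Spec_content_based_recommendation (user_preferences : List String) (out : List String) : Prop := out = content_based_recommendation_alt user_preferences
instance (user_preferences : List String) (out : List String) : Decidable (Spec_content_based_recommendation user_preferences out) := by unfold Spec_content_based_recommendation; infer_instance

-- ===== CLAIM (what is proved, stated in full; the proofs are below) =====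
def Claim_equal_content_based_recommendation : Prop := ∀ (user_preferences : List String), Dom_content_based_recommendation user_preferences → Spec_content_based_recommendation user_preferences (content_based_recommendation user_preferences)

-- ===== LEMMAS AND PROOFS =====

-- A's truthiness test on the genre intersection is "some preference occurs among the genres"
theorem pv_condA (u gs : List String) :
    decide (PySem.Set.inter (PySem.Set.ofList u) (PySem.Set.ofList gs) ≠ []) =
      u.any (fun x => gs.contains x) := by
  rw [show (u.any fun x => gs.contains x) = decide (∃ x ∈ u, x ∈ gs) by
      rw [Bool.eq_iff_iff]; simp, decide_eq_decide]
  constructor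
  · intro h
    rcases List.exists_mem_of_ne_nil _ h with ⟨x, hx⟩
    rw [PySem.Set.mem_inter] at hx
    exact ⟨x, (PySem.Set.mem_ofList u x).mp hx.1, (PySem.Set.mem_ofList gs x).mp hx.2⟩
  · rintro ⟨x, hxu, hxg⟩ hnil
    have : x ∈ PySem.Set.inter (PySem.Set.ofList u) (PySem.Set.ofList gs) :=
      (PySem.Set.mem_inter _ _ _).mpr
        ⟨(PySem.Set.mem_ofList u x).mpr hxu, (PySem.Set.mem_ofList gs x).mpr hxg⟩
    simp [hnil] at this

-- evaluated form of the inverted index's lookup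
theorem pv_idx (g : String) :
    pvIndex.getD g [] =
      if "Action" == g then ["Movie1", "Movie3"]
      else if "Adventure" == g then ["Movie1", "Movie4"]
      else if "Comedy" == g then ["Movie2", "Movie4"]
      else if "Romance" == g then ["Movie2", "Movie5"]
      else if "Drama" == g then ["Movie3", "Movie5"]
      else [] := by
  have h : pvIndex = PySem.Dict.mk
      [("Action", ["Movie1", "Movie3"]), ("Adventure", ["Movie1", "Movie4"]),
       ("Comedy", ["Movie2", "Movie4"]), ("Romance", ["Movie2", "Movie5"]),
       ("Drama", ["Movie3", "Movie5"])] := by decide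
  rw [h]
  simp only [PySem.Dict.getD, PySem.Dict.get?_mk_cons]
  split_ifs <;> rfl

-- B's accumulated result set contains m iff some preference's index bucket holds m
theorem pv_recContains (u : List String) (s : PySem.Set String) (m : String) :
    PySem.Set.contains
        (u.foldl (fun s g => PySem.Set.update s (pvIndex.getD g [])) s) m =
      (PySem.Set.contains s m || u.any (fun g => (pvIndex.getD g []).contains m)) := by
  induction u generalizing s with
  | nil => simp only [List.foldl_nil, List.any_nil, Bool.or_false]
  | cons g u ih =>
    simp only [List.foldl_cons, List.any_cons, ih]
    have : PySem.Set.contains (PySem.Set.update s (pvIndex.getD g [])) m =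
        (PySem.Set.contains s m || (pvIndex.getD g []).contains m) := by
      rw [Bool.eq_iff_iff, Bool.or_eq_true, PySem.Set.contains_iff,
        PySem.Set.contains_iff, PySem.Set.mem_update, List.contains_iff_mem]
    rw [this, Bool.or_assoc]

-- ===== VERDICT (by name: the statement is the Claim_ definition above) =====
theorem content_based_recommendation_spec : Claim_equal_content_based_recommendation := by
  intro u _
  unfold Spec_content_based_recommendation content_based_recommendation
    content_based_recommendation_alt
  dsimp only
  rw [PySem.List.foldl_append_ite
        (p := fun mg => PySem.Set.inter (PySem.Set.ofList u) (PySem.Set.ofList mg.2) ≠ [])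
        (f := fun mg : String × List String => mg.1),
      List.filter_map, List.nil_append]
  apply congrArg (List.map _)
  apply List.filter_congr
  intro p hp
  rw [pv_condA, Function.comp_apply, pv_recContains,
    show PySem.Set.contains PySem.Set.empty p.1 = false from rfl, Bool.false_or]
  apply PySem.List.any_congr_mem
  intro g _
  fin_cases hp <;>
    · rw [pv_idx, Bool.eq_iff_iff]
      split_ifs <;> simp only [beq_iff_eq] at * <;>
        first
        | (subst_vars; decide)
        | (simp only [List.contains_iff_mem, List.mem_cons, List.not_mem_nil, or_false,
            false_iff, iff_false]
           rintro (rfl | rfl) <;> simp_all)
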